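-- pv_equiv track=rewrite | github.com/kaste/Package-x-Control | impl/git_package.py | parse_ref_output
-- ===== SOURCE A (Python) =====
-- from typing_extensions import Required, TypeAlias
--
-- Ref: TypeAlias = str
--
-- Sha: TypeAlias = str
--
-- def parse_ref_output(stdout: str, remove_prefix: str = "") -> dict[Ref, Sha]:
--     # Parse the output and organize tag data
--     rv = {}  # {ref: commit_hash}
--     for line in stdout.strip().split("\n"):
--         if not line:
--             continue
--
--         parts = line.split()
--         if len(parts) != 2:
--             continue
--
--         """
--         Example line format:
--         c80596e48e4fedd78596a66b3d79c67488f828aa        refs/tags/2.47.1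
--         f3fad6a5617c802c95b46c4eeada797bc282e7cd        refs/tags/2.47.1^{}
--         """
--         commit_hash, ref = parts
--
--         ref = ref[len(remove_prefix):]
--         # Check if it's a dereferenced tag (^{})
--         is_deref = ref.endswith("^{}")
--         if is_deref:
--             ref = ref[:-3]  # Remove suffix "^{}"
--             rv[ref] = commit_hash
--         else:
--             rv.setdefault(ref, commit_hash)
--
--     return rv
-- ===== SOURCE B (Python) =====
-- def _parse_line(line, n):
--     parts = line.split()
--     if len(parts) != 2:
--         return None
--     sha, ref = parts[0], parts[1]
--     ref = ref[n:]
--     if ref.endswith("^{}"):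
--         return (ref[:-3], sha, True)
--     return (ref, sha, False)
--
--
-- def parse_ref_output(stdout: str, remove_prefix: str = "") -> dict:
--     n = len(remove_prefix)
--     entries = [e for e in (_parse_line(line, n) for line in stdout.strip().split("\n")) if e is not None]
--     # pass 1: collect dereferenced-tag shas, last one wins
--     deref = {}
--     for ref, sha, is_deref in entries:
--         if is_deref:
--             deref[ref] = sha
--     # pass 2: first occurrence fixes the position; a deref sha overrides
--     rv = {}
--     for ref, sha, _ in entries:
--         if ref not in rv:
--             rv[ref] = deref.get(ref, sha)
--     return rv
-- ===== Notes on version B (the rewrite author's own statement) =====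
-- stated objective: alternative
-- what changed: Replaces A's single stateful loop (deref assignment vs setdefault interleaved on one dict) with a parse phase producing (ref, sha, is_deref) entries, a first pass collecting a last-wins dict of dereferenced shas, and a second first-wins pass that fills the result consulting the deref dict.
import Mathlib
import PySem

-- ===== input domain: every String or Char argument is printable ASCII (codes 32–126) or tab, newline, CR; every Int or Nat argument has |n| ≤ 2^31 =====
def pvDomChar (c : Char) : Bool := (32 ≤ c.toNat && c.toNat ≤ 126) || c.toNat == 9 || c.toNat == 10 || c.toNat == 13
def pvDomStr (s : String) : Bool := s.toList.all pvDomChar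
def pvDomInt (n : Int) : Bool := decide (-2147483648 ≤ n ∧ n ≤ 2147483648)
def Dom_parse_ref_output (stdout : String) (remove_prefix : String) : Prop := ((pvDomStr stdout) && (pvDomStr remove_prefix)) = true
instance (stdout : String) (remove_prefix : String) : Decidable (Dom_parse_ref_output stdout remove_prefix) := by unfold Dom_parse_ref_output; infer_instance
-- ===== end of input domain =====

-- B replaces A's single stateful loop (deref assignment vs setdefault on one dict) with a parse
-- phase and two simple passes: a last-wins dict of dereferenced shas, then a first-wins fill that
-- consults it; same return value, different decomposition (objective: alternative).

-- ===== PORT A =====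
-- literal transliteration of A; s.split("\n") is PySem.Str.split? with the non-empty literal
-- separator "\n", on which split? is always `some` (exact).
def parse_ref_output (stdout : String) (remove_prefix : String) : List (String × String) :=
  (((PySem.Str.split? (PySem.Str.strip stdout) "\n").getD []).foldl
    (fun rv line =>
      if line = "" then rv
      else
        match PySem.Str.split₀ line with
        | [commit_hash, ref0] =>
          let ref := PySem.Str.slice ref0 (some (PySem.Str.len remove_prefix)) none
          if PySem.Str.endswith ref "^{}" then
            rv.insert (PySem.Str.slice ref none (some (-3))) commit_hash
          else
            rv.setdefault ref commit_hash
        | _ => rv)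
    PySem.Dict.empty).items

-- ===== PORT B =====
def pvParseLine (n : Int) (line : String) : Option (String × String × Bool) :=
  let parts := PySem.Str.split₀ line
  if parts.length = 2 then
    let sha := parts.getD 0 ""
    let ref0 := parts.getD 1 ""
    let ref := PySem.Str.slice ref0 (some n) none
    if PySem.Str.endswith ref "^{}" then
      some (PySem.Str.slice ref none (some (-3)), sha, true)
    else
      some (ref, sha, false)
  else none

def parse_ref_output_alt (stdout : String) (remove_prefix : String) : List (String × String) :=
  let n : Int := PySem.Str.len remove_prefix
  let entries := ((PySem.Str.split? (PySem.Str.strip stdout) "\n").getD []).filterMap (pvParseLine n)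
  let deref := entries.foldl
    (fun d e => if e.2.2 then d.insert e.1 e.2.1 else d) PySem.Dict.empty
  let rv := entries.foldl
    (fun rv e => if rv.contains e.1 then rv else rv.insert e.1 (deref.getD e.1 e.2.1))
    PySem.Dict.empty
  rv.items

-- ===== PRECONDITION & SPEC =====
def Spec_parse_ref_output (stdout : String) (remove_prefix : String) (out : List (String × String)) : Prop := out = parse_ref_output_alt stdout remove_prefix
instance (stdout : String) (remove_prefix : String) (out : List (String × String)) : Decidable (Spec_parse_ref_output stdout remove_prefix out) := by unfold Spec_parse_ref_output; infer_instance

-- ===== CLAIM (what is proved, stated in full; the proofs are below) =====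
def Claim_equal_parse_ref_output : Prop := ∀ (stdout : String) (remove_prefix : String), Dom_parse_ref_output stdout remove_prefix → Spec_parse_ref_output stdout remove_prefix (parse_ref_output stdout remove_prefix)

-- ===== LEMMAS AND PROOFS =====

def pvStepA (d : PySem.Dict String String) (e : String × String × Bool) : PySem.Dict String String :=
  if e.2.2 then d.insert e.1 e.2.1 else d.setdefault e.1 e.2.1
lemma pv_not_contains_ne (d : PySem.Dict String String) (k : String)
    (hc : d.contains k = false) : ∀ p ∈ d.items, p.1 ≠ k := by
  obtain ⟨l⟩ := d
  simp only [PySem.Dict.contains_mk, List.any_eq_false] at hc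
  intro p hp
  simpa using hc p hp
def pvStepD (d : PySem.Dict String String) (e : String × String × Bool) : PySem.Dict String String :=
  if e.2.2 then d.insert e.1 e.2.1 else d
def pvStepB (D : PySem.Dict String String) (rv : PySem.Dict String String)
    (e : String × String × Bool) : PySem.Dict String String :=
  if rv.contains e.1 then rv else rv.insert e.1 (D.getD e.1 e.2.1)
def pvPatch (D d : PySem.Dict String String) : PySem.Dict String String :=
  PySem.Dict.mk (d.items.map (fun p => (p.1, D.getD p.1 p.2)))
lemma pvPatch_contains (D d : PySem.Dict String String) (k : String) :
    (pvPatch D d).contains k = d.contains k := by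
  obtain ⟨l⟩ := d
  simp [pvPatch, PySem.Dict.contains_mk, List.any_map, Function.comp_def]
lemma pvPatch_empty (D : PySem.Dict String String) :
    pvPatch D PySem.Dict.empty = PySem.Dict.empty := rfl
lemma pvPatch_id (d : PySem.Dict String String) :
    pvPatch PySem.Dict.empty d = d := by
  obtain ⟨l⟩ := d
  simp [pvPatch]
lemma pvDeref_get? (t : List (String × String × Bool)) (d : PySem.Dict String String) (k : String) :
    (t.foldl pvStepD d).get? k = ((t.foldl pvStepD PySem.Dict.empty).get? k).or (d.get? k) := by
  induction t generalizing d with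
  | nil => simp [PySem.Dict.get?_empty]
  | cons e t ih =>
    simp only [List.foldl_cons]
    rw [ih (pvStepD d e), ih (pvStepD PySem.Dict.empty e), Option.or_assoc]
    congr 1
    show (pvStepD d e).get? k = ((pvStepD PySem.Dict.empty e).get? k).or (d.get? k)
    unfold pvStepD
    by_cases hb : e.2.2 = true
    · simp only [hb, if_pos]
      rw [PySem.Dict.get?_insert, PySem.Dict.get?_insert]
      split <;> simp [PySem.Dict.get?_empty]
    · simp [hb, PySem.Dict.get?_empty]
lemma pvDeref_getD_cons_ne (e : String × String × Bool) (t : List (String × String × Bool))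
    (k : String) (v : String) (h : ¬ (k = e.1 ∧ e.2.2 = true)) :
    (((e :: t).foldl pvStepD PySem.Dict.empty)).getD k v
      = ((t.foldl pvStepD PySem.Dict.empty)).getD k v := by
  simp only [List.foldl_cons, PySem.Dict.getD_eq_get?_getD]
  rw [pvDeref_get?]
  have : (pvStepD PySem.Dict.empty e).get? k = none := by
    unfold pvStepD
    by_cases hb : e.2.2 = true
    · have hk : k ≠ e.1 := fun hk => h ⟨hk, hb⟩
      simp [hb, PySem.Dict.get?_insert, hk]
    · simp [hb, PySem.Dict.get?_empty]
  rw [this]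
  cases (t.foldl pvStepD PySem.Dict.empty).get? k <;> simp
lemma pvDeref_getD_cons_self (e : String × String × Bool) (t : List (String × String × Bool))
    (v : String) (hb : e.2.2 = true) :
    (((e :: t).foldl pvStepD PySem.Dict.empty)).getD e.1 v
      = ((t.foldl pvStepD PySem.Dict.empty)).getD e.1 e.2.1 := by
  simp only [List.foldl_cons, PySem.Dict.getD_eq_get?_getD]
  rw [pvDeref_get?]
  have : (pvStepD PySem.Dict.empty e).get? e.1 = some e.2.1 := by
    unfold pvStepD
    simp [hb]
  rw [this]
  cases (t.foldl pvStepD PySem.Dict.empty).get? e.1 <;> simp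
lemma pvFoldB_congr (t : List (String × String × Bool)) (D D' X : PySem.Dict String String)
    (h : ∀ e ∈ t, X.contains e.1 = true ∨ D.getD e.1 e.2.1 = D'.getD e.1 e.2.1) :
    t.foldl (pvStepB D) X = t.foldl (pvStepB D') X := by
  induction t generalizing X with
  | nil => rfl
  | cons e t ih =>
    simp only [List.foldl_cons]
    have he := h e (by simp)
    by_cases hc : X.contains e.1 = true
    · have h1 : pvStepB D X e = X := by simp [pvStepB, hc]
      have h2 : pvStepB D' X e = X := by simp [pvStepB, hc]
      rw [h1, h2]
      exact ih X (fun e' he' => h e' (by simp [he']))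
    · have hv : D.getD e.1 e.2.1 = D'.getD e.1 e.2.1 := he.resolve_left hc
      have h1 : pvStepB D X e = X.insert e.1 (D.getD e.1 e.2.1) := by simp [pvStepB, hc]
      have h2 : pvStepB D' X e = X.insert e.1 (D.getD e.1 e.2.1) := by simp [pvStepB, hc, hv]
      rw [h1, h2]
      refine ih _ (fun e' he' => ?_)
      rcases h e' (by simp [he']) with hc' | hv'
      · left; rw [PySem.Dict.contains_insert]; simp [hc']
      · right; exact hv'
lemma pvStep_patch (e : String × String × Bool) (t : List (String × String × Bool))
    (d : PySem.Dict String String) :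
    pvPatch (t.foldl pvStepD PySem.Dict.empty) (pvStepA d e)
      = pvStepB ((e :: t).foldl pvStepD PySem.Dict.empty)
          (pvPatch ((e :: t).foldl pvStepD PySem.Dict.empty) d) e := by
  have hgetne : ∀ (k v : String), k ≠ e.1 →
      ((e :: t).foldl pvStepD PySem.Dict.empty).getD k v
        = (t.foldl pvStepD PySem.Dict.empty).getD k v :=
    fun k v hk => pvDeref_getD_cons_ne e t k v (fun h => hk h.1)
  by_cases hc : d.contains e.1 = true
  · have hrv : (pvPatch ((e :: t).foldl pvStepD PySem.Dict.empty) d).contains e.1 = true := by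
      rw [pvPatch_contains]; exact hc
    have hR : pvStepB ((e :: t).foldl pvStepD PySem.Dict.empty)
        (pvPatch ((e :: t).foldl pvStepD PySem.Dict.empty) d) e
        = pvPatch ((e :: t).foldl pvStepD PySem.Dict.empty) d := by
      unfold pvStepB; rw [if_pos hrv]
    rw [hR]
    by_cases hb : e.2.2 = true
    · have hA : pvStepA d e = d.insert e.1 e.2.1 := by simp [pvStepA, hb]
      rw [hA]
      apply PySem.Dict.ext
      show ((d.insert e.1 e.2.1).items.map _) = (d.items.map _)
      rw [PySem.Dict.items_insert_of_contains d e.2.1 hc, List.map_map]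
      apply List.map_congr_left
      intro p _
      by_cases hp : p.1 = e.1
      · have hbeq : (p.1 == e.1) = true := by simp [hp]
        simp only [Function.comp_def, hbeq, if_pos]
        rw [hp, pvDeref_getD_cons_self e t p.2 hb]
      · have hbeq : (p.1 == e.1) = false := by simp [hp]
        simp only [Function.comp_def, hbeq, Bool.false_eq_true, if_false]
        rw [hgetne p.1 p.2 hp]
    · have hA : pvStepA d e = d := by
        simp [pvStepA, hb, PySem.Dict.setdefault_of_contains d e.2.1 hc]
      rw [hA]
      apply PySem.Dict.ext
      show (d.items.map _) = (d.items.map _)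
      apply List.map_congr_left
      intro p _
      by_cases hp : p.1 = e.1
      · rw [hp, pvDeref_getD_cons_ne e t e.1 p.2 (fun h => hb h.2)]
      · rw [hgetne p.1 p.2 hp]
  · have hcf : d.contains e.1 = false := by simpa using hc
    have hne := pv_not_contains_ne d e.1 hcf
    have hrv : (pvPatch ((e :: t).foldl pvStepD PySem.Dict.empty) d).contains e.1 = false := by
      rw [pvPatch_contains]; exact hcf
    have hR : pvStepB ((e :: t).foldl pvStepD PySem.Dict.empty)
        (pvPatch ((e :: t).foldl pvStepD PySem.Dict.empty) d) e
        = (pvPatch ((e :: t).foldl pvStepD PySem.Dict.empty) d).insert e.1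
            (((e :: t).foldl pvStepD PySem.Dict.empty).getD e.1 e.2.1) := by
      unfold pvStepB; rw [if_neg (by simp only [List.foldl_cons] at hrv ⊢; simp [hrv])]
    rw [hR]
    have hvals : ((e :: t).foldl pvStepD PySem.Dict.empty).getD e.1 e.2.1
        = (t.foldl pvStepD PySem.Dict.empty).getD e.1 e.2.1 := by
      by_cases hb : e.2.2 = true
      · exact pvDeref_getD_cons_self e t e.2.1 hb
      · exact pvDeref_getD_cons_ne e t e.1 e.2.1 (fun h => hb h.2)
    have hAitems : (pvStepA d e).items = d.items ++ [(e.1, e.2.1)] := by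
      by_cases hb : e.2.2 = true
      · simp only [pvStepA, hb, if_pos]
        exact PySem.Dict.items_insert_of_not_contains d e.2.1 hcf
      · simp only [pvStepA, hb]
        rw [if_neg (by simp), PySem.Dict.setdefault_of_not_contains d e.2.1 hcf]
        exact PySem.Dict.items_insert_of_not_contains d e.2.1 hcf
    apply PySem.Dict.ext
    rw [PySem.Dict.items_insert_of_not_contains _ _ hrv]
    show ((pvStepA d e).items.map _) = _
    rw [hAitems, List.map_append]
    congr 1
    · apply List.map_congr_left
      intro p hp
      rw [hgetne p.1 p.2 (hne p hp)]
    · simp only [List.foldl_cons] at hvals ⊢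
      simp [hvals]
lemma pvStepB_contains_self (D rv : PySem.Dict String String) (e : String × String × Bool) :
    (pvStepB D rv e).contains e.1 = true := by
  unfold pvStepB
  by_cases hc : rv.contains e.1 = true
  · rw [if_pos hc]; exact hc
  · rw [if_neg hc, PySem.Dict.contains_insert]; simp
lemma pvMain (es : List (String × String × Bool)) (d : PySem.Dict String String) :
    es.foldl pvStepA d
      = es.foldl (pvStepB (es.foldl pvStepD PySem.Dict.empty))
          (pvPatch (es.foldl pvStepD PySem.Dict.empty) d) := by
  induction es generalizing d with
  | nil => simp [pvPatch_id]
  | cons e t ih =>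
    simp only [List.foldl_cons]
    rw [ih (pvStepA d e)]
    have hstep := pvStep_patch e t d
    simp only [List.foldl_cons] at hstep
    rw [hstep]
    apply pvFoldB_congr
    intro e' he'
    by_cases hk : e'.1 = e.1
    · left; rw [hk]; exact pvStepB_contains_self _ _ _
    · right
      have := pvDeref_getD_cons_ne e t e'.1 e'.2.1 (fun h => hk h.1)
      simp only [List.foldl_cons] at this
      exact this.symm

-- ===== VERDICT (by name: the statement is the Claim_ definition above) =====
theorem parse_ref_output_spec : Claim_equal_parse_ref_output := by
  intro stdout remove_prefix _
  unfold Spec_parse_ref_output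
  unfold parse_ref_output parse_ref_output_alt
  dsimp only
  rw [show (fun (d : PySem.Dict String String) (e : String × String × Bool) =>
        if e.2.2 then d.insert e.1 e.2.1 else d) = pvStepD from rfl]
  rw [show (fun (rv : PySem.Dict String String) (e : String × String × Bool) =>
        if rv.contains e.1 then rv
        else rv.insert e.1
          (((((PySem.Str.split? (PySem.Str.strip stdout) "\n").getD []).filterMap
              (pvParseLine (PySem.Str.len remove_prefix))).foldl pvStepD PySem.Dict.empty).getD e.1 e.2.1))
      = pvStepB ((((PySem.Str.split? (PySem.Str.strip stdout) "\n").getD []).filterMap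
              (pvParseLine (PySem.Str.len remove_prefix))).foldl pvStepD PySem.Dict.empty) from rfl]
  apply congrArg PySem.Dict.items
  have h1 : ((PySem.Str.split? (PySem.Str.strip stdout) "\n").getD []).foldl
        (fun rv line =>
          if line = "" then rv
          else
            match PySem.Str.split₀ line with
            | [commit_hash, ref0] =>
              let ref := PySem.Str.slice ref0 (some (PySem.Str.len remove_prefix)) none
              if PySem.Str.endswith ref "^{}" then
                rv.insert (PySem.Str.slice ref none (some (-3))) commit_hash
              else
                rv.setdefault ref commit_hash
            | _ => rv)
        PySem.Dict.empty
      = (((PySem.Str.split? (PySem.Str.strip stdout) "\n").getD []).filterMap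
          (pvParseLine (PySem.Str.len remove_prefix))).foldl pvStepA PySem.Dict.empty := by
    refine Eq.trans ?_ List.foldl_filterMap.symm
    apply List.foldl_ext
    intro d line _
    by_cases h0 : line = ""
    · subst h0; rfl
    · rw [if_neg h0]
      unfold pvParseLine
      cases hsp : PySem.Str.split₀ line with
      | nil => rfl
      | cons a tl =>
        cases tl with
        | nil => rfl
        | cons b tl2 =>
          cases tl2 with
          | nil =>
            dsimp only
            have hlen : ([a, b] : List String).length = 2 := by simp
            rw [if_pos hlen]
            simp only [List.getD_cons_zero, List.getD_cons_succ]
            by_cases hE : PySem.Str.endswith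
                (PySem.Str.slice b (some (PySem.Str.len remove_prefix)) none) "^{}" = true
            · rw [if_pos hE, if_pos hE]; rfl
            · rw [if_neg hE, if_neg hE]; rfl
          | cons c tl3 =>
            dsimp only
            rw [if_neg (by simp)]
  rw [h1, pvMain, pvPatch_empty]
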